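-- pv_equiv track=rewrite | github.com/DaviCMachado/T1_comunicacao | functions.py | ami
-- ===== SOURCE A (Python) =====
-- def ami(bits):
--     tempo, sinal = [], []
--     nivel = 1
--     t = 0
--     for bit in bits:
--         tempo += [t, t + 1]
--         if bit == '1':
--             sinal += [nivel] * 2
--             nivel *= -1
--         else:
--             sinal += [0] * 2
--         t += 1
--     return tempo, sinal
-- ===== SOURCE B (Python) =====
-- def ami(bits):
--     bits = list(bits)
--     n = len(bits)
--     tempo = [x for i in range(n) for x in (i, i + 1)]
--     # preallocate zeros, then scatter alternating pulses at the '1' positions, pair by pair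
--     sinal = [0] * (2 * n)
--     ones = [i for i, b in enumerate(bits) if b == '1']
--     for k in range(0, len(ones), 2):
--         p = ones[k]
--         sinal[2 * p] = 1
--         sinal[2 * p + 1] = 1
--         if k + 1 < len(ones):
--             m = ones[k + 1]
--             sinal[2 * m] = -1
--             sinal[2 * m + 1] = -1
--     return tempo, sinal
-- ===== Notes on version B (the rewrite author's own statement) =====
-- stated objective: alternative
-- what changed: B preallocates a zero signal array and scatters pulse pairs into it at the collected positions of '1' bits, consuming those positions two at a time (+1 then -1), instead of A's single sequential pass that appends to both lists while flip-flopping a level variable; tempo is built by a separate comprehension.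
import Mathlib
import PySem

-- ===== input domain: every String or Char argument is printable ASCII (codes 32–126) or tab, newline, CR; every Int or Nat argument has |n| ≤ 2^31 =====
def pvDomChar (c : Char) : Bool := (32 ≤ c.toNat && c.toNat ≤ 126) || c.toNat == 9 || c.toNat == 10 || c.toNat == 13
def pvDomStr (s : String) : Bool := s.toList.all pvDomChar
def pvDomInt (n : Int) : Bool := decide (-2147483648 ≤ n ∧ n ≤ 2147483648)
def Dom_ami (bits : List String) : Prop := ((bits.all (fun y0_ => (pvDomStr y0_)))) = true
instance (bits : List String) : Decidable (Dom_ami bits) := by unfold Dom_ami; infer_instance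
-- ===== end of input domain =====

-- B preallocates a zero signal array and scatters +1/-1 pulse pairs at the collected '1' positions (two at a time), instead of A's single appending pass with a flip-flopping level; objective: alternative decomposition, same cost.


-- ===== PORT A =====
-- A's single loop carrying (tempo, sinal, nivel, t)
def amiGo : List String → List Int → List Int → Int → Int → List Int × List Int
  | [], tempo, sinal, _, _ => (tempo, sinal)
  | bit :: bs, tempo, sinal, nivel, t =>
    if bit = "1" then
      amiGo bs (tempo ++ [t, t + 1]) (sinal ++ [nivel, nivel]) (nivel * -1) (t + 1)
    else
      amiGo bs (tempo ++ [t, t + 1]) (sinal ++ [0, 0]) nivel (t + 1)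

def ami (bits : List String) : List Int × List Int := amiGo bits [] [] 1 0

-- ===== PORT B =====
-- ones = [i for i, b in enumerate(bits) if b == '1']  (index accumulator i)
def onesFrom : List String → Nat → List Nat
  | [], _ => []
  | b :: bs, i => if b = "1" then i :: onesFrom bs (i + 1) else onesFrom bs (i + 1)

-- B's scatter loop over range(0, len(ones), 2): for each pair, write +1 at ones[k] and -1 at
-- ones[k+1] (if present).  List assignment sinal[j] = v is ported as List.set: exact here since
-- every written index is in range (each position p satisfies 2*p+1 < 2*n).
def scatter : List Nat → List Int → List Int
  | [], s => s
  | [p], s => (s.set (2 * p) 1).set (2 * p + 1) 1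
  | p :: m :: rest, s =>
      scatter rest ((((s.set (2 * p) 1).set (2 * p + 1) 1).set (2 * m) (-1)).set (2 * m + 1) (-1))

def ami_alt (bits : List String) : List Int × List Int :=
  ((List.range bits.length).flatMap (fun i : Nat => [(i : Int), (i : Int) + 1]),
   scatter (onesFrom bits 0) (List.replicate (2 * bits.length) (0 : Int)))

-- ===== PRECONDITION & SPEC =====
def Spec_ami (bits : List String) (out : List Int × List Int) : Prop := out = ami_alt bits
instance (bits : List String) (out : List Int × List Int) : Decidable (Spec_ami bits out) := by unfold Spec_ami; infer_instance

-- ===== CLAIM (what is proved, stated in full; the proofs are below) =====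
def Claim_equal_ami : Prop := ∀ (bits : List String), Dom_ami bits → Spec_ami bits (ami bits)

-- ===== LEMMAS AND PROOFS =====

-- pure "tails" of A's loop, for the accumulator generalisation
def tPart : List String → Int → List Int
  | [], _ => []
  | _ :: bs, t => t :: (t + 1) :: tPart bs (t + 1)

def sPart : List String → Int → List Int
  | [], _ => []
  | bit :: bs, nivel =>
    if bit = "1" then nivel :: nivel :: sPart bs (nivel * -1)
    else 0 :: 0 :: sPart bs nivel

theorem amiGo_eq (bs : List String) : ∀ (tempo sinal : List Int) (nivel t : Int),
    amiGo bs tempo sinal nivel t = (tempo ++ tPart bs t, sinal ++ sPart bs nivel) := by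
  induction bs with
  | nil => intro tempo sinal nivel t; simp [amiGo, tPart, sPart]
  | cons bit bs ih =>
    intro tempo sinal nivel t
    by_cases h : bit = "1" <;> simp [amiGo, tPart, sPart, h, ih]

theorem tPart_eq (bs : List String) : ∀ (k : Nat),
    tPart bs (k : Int) = (List.range' k bs.length).flatMap (fun i : Nat => [(i : Int), (i : Int) + 1]) := by
  induction bs with
  | nil => intro k; simp [tPart]
  | cons bit bs ih =>
    intro k
    have h1 : ((k : Int) + 1) = ((k + 1 : Nat) : Int) := by push_cast; ring
    rw [tPart, h1, ih, List.length_cons, List.range'_succ, List.flatMap_cons]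
    simp

-- one-position-at-a-time version of the scatter loop, carrying the alternating value
def writeAlt : List Nat → Int → List Int → List Int
  | [], _, s => s
  | p :: rest, v, s => writeAlt rest (-v) ((s.set (2 * p) v).set (2 * p + 1) v)

theorem scatter_eq_aux : ∀ (n : Nat) (qs : List Nat), qs.length ≤ n →
    ∀ s, scatter qs s = writeAlt qs 1 s := by
  intro n
  induction n with
  | zero =>
    intro qs hq s
    have : qs = [] := List.length_eq_zero_iff.mp (Nat.le_zero.mp hq)
    simp [this, scatter, writeAlt]
  | succ n ih =>
    intro qs hq s
    match qs with
    | [] => simp [scatter, writeAlt]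
    | [p] => simp [scatter, writeAlt]
    | p :: m :: rest =>
      have hlen : rest.length ≤ n := by simp at hq; omega
      rw [scatter, ih rest hlen, writeAlt, writeAlt]
      norm_num

theorem scatter_eq (qs : List Nat) (s : List Int) : scatter qs s = writeAlt qs 1 s :=
  scatter_eq_aux qs.length qs le_rfl s

-- shifting every position by one skips the first two cells
theorem writeAlt_shift (qs : List Nat) : ∀ (v : Int) (a b : Int) (s : List Int),
    writeAlt (qs.map (· + 1)) v (a :: b :: s) = a :: b :: writeAlt qs v s := by
  induction qs with
  | nil => intro v a b s; simp [writeAlt]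
  | cons p rest ih =>
    intro v a b s
    have h2 : 2 * (p + 1) = 2 * p + 1 + 1 := by ring
    rw [List.map_cons, writeAlt, h2]
    simp only [List.set_cons_succ]
    rw [ih]
    rfl

theorem onesFrom_shift (bs : List String) : ∀ (i : Nat),
    onesFrom bs (i + 1) = (onesFrom bs i).map (· + 1) := by
  induction bs with
  | nil => intro i; simp [onesFrom]
  | cons b bs ih =>
    intro i
    by_cases h : b = "1" <;> simp [onesFrom, h, ih (i + 1), ih i]

theorem writeAlt_ones (bs : List String) : ∀ (v : Int),
    writeAlt (onesFrom bs 0) v (List.replicate (2 * bs.length) 0) = sPart bs v := by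
  induction bs with
  | nil => intro v; simp [onesFrom, writeAlt, sPart]
  | cons b bs ih =>
    intro v
    have hrep : List.replicate (2 * (b :: bs).length) (0 : Int)
        = 0 :: 0 :: List.replicate (2 * bs.length) 0 := by
      have : 2 * (b :: bs).length = 2 * bs.length + 1 + 1 := by simp; ring
      rw [this, List.replicate_succ, List.replicate_succ]
    by_cases h : b = "1"
    · have hones : onesFrom (b :: bs) 0 = 0 :: (onesFrom bs 0).map (· + 1) := by
        simp [onesFrom, h, onesFrom_shift]
      rw [hones, hrep, writeAlt]
      simp only [Nat.mul_zero, List.set_cons_zero, List.set_cons_succ]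
      rw [writeAlt_shift, ih (-v)]
      simp [sPart, h]
    · have hones : onesFrom (b :: bs) 0 = (onesFrom bs 0).map (· + 1) := by
        simp [onesFrom, h, onesFrom_shift]
      rw [hones, hrep, writeAlt_shift, ih v]
      simp [sPart, h]

-- ===== VERDICT (by name: the statement is the Claim_ definition above) =====
theorem ami_spec : Claim_equal_ami := by
  intro bits _
  unfold Spec_ami ami ami_alt
  rw [amiGo_eq, scatter_eq, writeAlt_ones, List.range_eq_range']
  have h0 : tPart bits ((0 : Nat) : Int)
      = (List.range' 0 bits.length).flatMap (fun i : Nat => [(i : Int), (i : Int) + 1]) := tPart_eq bits 0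
  simp at h0
  simp [h0]
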